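-- pv_equiv track=rewrite | github.com/blackboxprogramming/blackroad-scripts | .roadchain/solutions/arithmetic.py | dirichlet_character
-- ===== SOURCE A (Python) =====
-- def dirichlet_character(d, n):
--     """
--     Kronecker symbol (d/n) — the Dirichlet character χ_d.
--     For fundamental discriminant d, χ_d is a primitive character.
--     """
--     if n == 0:
--         return 0
--     if d == 1:
--         return 1
--
--     # Kronecker symbol via Jacobi symbol extension
--     result = 1
--     if n < 0:
--         n = -n
--         if d < 0:
--             result = -1
--
--     # Handle factors of 2
--     while n % 2 == 0:
--         n //= 2
--         if d % 8 in (3, 5):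
--             result = -result
--
--     if n == 1:
--         return result
--
--     # Jacobi symbol for odd n
--     a = d % n
--     if a < 0:
--         a += n
--
--     while a != 0:
--         while a % 2 == 0:
--             a //= 2
--             if n % 8 in (3, 5):
--                 result = -result
--         a, n = n, a
--         if a % 4 == 3 and n % 4 == 3:
--             result = -result
--         a = a % n
--
--     return result if n == 1 else 0
-- ===== SOURCE B (Python) =====
-- def dirichlet_character(d, n):
--     """Kronecker symbol (d/n) computed multiplicatively: factor |n| and
--     multiply per-prime symbols (Euler's criterion for odd primes)."""
--     if n == 0:
--         return 0
--     if d == 1: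
--         return 1
--
--     result = 1
--     if n < 0:
--         n = -n
--         if d < 0:
--             result = -1
--
--     # 2-part: one sign per factor of 2
--     while n % 2 == 0:
--         n //= 2
--         if d % 8 in (3, 5):
--             result = -result
--
--     # odd part: trial division, Legendre symbol by Euler's criterion
--     f = 3
--     while f * f <= n:
--         while n % f == 0:
--             n //= f
--             result *= _legendre(d, f)
--         f += 2
--     if n > 1:
--         result *= _legendre(d, n)
--     return result
--
--
-- def _legendre(d, p):
--     """Legendre symbol (d/p) for an odd prime p, via Euler's criterion."""
--     r = pow(d % p, (p - 1) // 2, p)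
--     return -1 if r == p - 1 else r
-- ===== Notes on version B (the rewrite author's own statement) =====
-- stated objective: alternative
-- what changed: Replaced A's quadratic-reciprocity swap loop (binary Jacobi algorithm) by the multiplicative definition of the Kronecker symbol: factor the odd part of |n| by trial division and multiply per-prime Legendre symbols computed with Euler's criterion (modular exponentiation), keeping the n==0, d==1, sign and factor-of-2 guards.
import Mathlib
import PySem

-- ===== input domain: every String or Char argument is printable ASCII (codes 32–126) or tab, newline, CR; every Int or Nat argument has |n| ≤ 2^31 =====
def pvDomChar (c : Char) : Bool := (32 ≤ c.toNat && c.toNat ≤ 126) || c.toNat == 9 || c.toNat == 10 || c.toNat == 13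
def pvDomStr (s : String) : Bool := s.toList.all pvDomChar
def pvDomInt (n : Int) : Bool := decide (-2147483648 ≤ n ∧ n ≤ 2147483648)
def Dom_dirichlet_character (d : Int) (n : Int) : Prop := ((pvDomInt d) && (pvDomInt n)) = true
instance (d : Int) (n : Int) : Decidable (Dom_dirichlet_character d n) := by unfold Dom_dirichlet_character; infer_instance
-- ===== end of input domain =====

-- B replaces A's quadratic-reciprocity swap loop by the multiplicative definition
-- (trial-division factoring + Euler's criterion per odd prime): an alternative
-- algorithm with the same observable behaviour, not claimed faster.
-- All loops are ported with a structural fuel argument that only makes them total;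
-- every call site supplies enough fuel, so each port computes exactly its Python's loop.

-- ===== PORT A =====

-- A's `while n % 2 == 0` / `while a % 2 == 0` loops: strip factors of 2 from `a`,
-- negating `result` once per factor when `m % 8 ∈ {3, 5}`.  The `a ≠ 0` conjunct and
-- the fuel only make the Python `while` total (every call site has fuel = a, enough
-- because `a` halves each step).
def pvStripAGo (m : Int) : Nat → Nat → Int → Nat × Int
  | 0, a, r => (a, r)
  | fuel + 1, a, r =>
    if a % 2 = 0 ∧ a ≠ 0 then
      pvStripAGo m fuel (a / 2) (if m % 8 = 3 ∨ m % 8 = 5 then -r else r)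
    else (a, r)

def pvStripA (m : Int) (a : Nat) (r : Int) : Nat × Int := pvStripAGo m a a r

-- A's outer `while a != 0` loop (state: a, n, result); fuel = initial `a` suffices
-- because `a` strictly decreases each iteration.
def pvJacAGo : Nat → Nat → Nat → Int → Nat × Int
  | 0, _, n, r => (n, r)
  | fuel + 1, a, n, r =>
    if a ≠ 0 then
      let s := pvStripA (n : Int) a r
      pvJacAGo fuel (n % s.1) s.1 (if s.1 % 4 = 3 ∧ n % 4 = 3 then -s.2 else s.2)
    else (n, r)

def pvJacA (a n : Nat) (result : Int) : Nat × Int := pvJacAGo a a n result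

def dirichlet_character (d : Int) (n : Int) : Int :=
  if n = 0 then 0
  else if d = 1 then 1
  else
    let result : Int := if n < 0 ∧ d < 0 then -1 else 1
    let t := pvStripA d n.natAbs result
    if t.1 = 1 then t.2
    else
      let a0 : Int := d % (t.1 : Int)
      let a1 : Int := if a0 < 0 then a0 + (t.1 : Int) else a0
      let u := pvJacA a1.toNat t.1 t.2
      if u.1 = 1 then u.2 else 0

-- ===== PORT B =====

-- B's factor-of-2 loop (same guards as A's; fuel again only for totality)
def pvStripBGo (m : Int) : Nat → Nat → Int → Nat × Int
  | 0, a, r => (a, r)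
  | fuel + 1, a, r =>
    if a % 2 = 0 ∧ a ≠ 0 then
      pvStripBGo m fuel (a / 2) (if m % 8 = 3 ∨ m % 8 = 5 then -r else r)
    else (a, r)

def pvStripB (m : Int) (a : Nat) (r : Int) : Nat × Int := pvStripBGo m a a r

-- `_legendre(d, p)`: Euler's criterion; `pow(d % p, (p-1)//2, p)` is ported as
-- `((d % p) ^ ((p-1)/2)) % p`, exact for p > 0.
def pvLegendre (d : Int) (p : Nat) : Int :=
  let r : Int := ((d % (p : Int)) ^ ((p - 1) / 2)) % (p : Int)
  if r = (p : Int) - 1 then -1 else r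

-- B's trial-division loop (state: f, n, result); fuel = n + n suffices: each
-- iteration divides `n` or advances `f`, and `f` stays below `n` while `f * f ≤ n`.
def pvTrialBGo (d : Int) : Nat → Nat → Nat → Int → Nat × Int
  | 0, _, n, r => (n, r)
  | fuel + 1, f, n, r =>
    if f * f ≤ n then
      if n % f = 0 then pvTrialBGo d fuel f (n / f) (r * pvLegendre d f)
      else pvTrialBGo d fuel (f + 2) n r
    else (n, r)

def pvTrialB (d : Int) (f n : Nat) (result : Int) : Nat × Int := pvTrialBGo d (n + n) f n result

def dirichlet_character_alt (d : Int) (n : Int) : Int :=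
  if n = 0 then 0
  else if d = 1 then 1
  else
    let result : Int := if n < 0 ∧ d < 0 then -1 else 1
    let t := pvStripB d n.natAbs result
    let u := pvTrialB d 3 t.1 t.2
    if 1 < u.1 then u.2 * pvLegendre d u.1 else u.2

-- ===== PRECONDITION & SPEC =====
def Spec_dirichlet_character (d : Int) (n : Int) (out : Int) : Prop := out = dirichlet_character_alt d n
instance (d : Int) (n : Int) (out : Int) : Decidable (Spec_dirichlet_character d n out) := by unfold Spec_dirichlet_character; infer_instance

-- ===== CLAIM (what is proved, stated in full; the proofs are below) =====
def Claim_equal_dirichlet_character : Prop := ∀ (d : Int) (n : Int), Dom_dirichlet_character d n → Spec_dirichlet_character d n (dirichlet_character d n)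

-- ===== LEMMAS AND PROOFS =====

theorem pvStripBGo_eq (m : Int) (fuel : Nat) : ∀ (a : Nat) (r : Int),
    pvStripBGo m fuel a r = pvStripAGo m fuel a r := by
  induction fuel with
  | zero => intro a r; rfl
  | succ fuel ih =>
    intro a r
    by_cases h : a % 2 = 0 ∧ a ≠ 0
    · simp only [pvStripBGo, pvStripAGo, if_pos h]; exact ih _ _
    · simp only [pvStripBGo, pvStripAGo, if_neg h]

theorem pvStripB_eq_pvStripA (m : Int) (a : Nat) (r : Int) :
    pvStripB m a r = pvStripA m a r := pvStripBGo_eq m a a r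

theorem pvStripAGo_fst_le (m : Int) (fuel : Nat) : ∀ (a : Nat) (r : Int),
    (pvStripAGo m fuel a r).1 ≤ a := by
  induction fuel with
  | zero => intro a r; exact le_rfl
  | succ fuel ih =>
    intro a r
    by_cases h : a % 2 = 0 ∧ a ≠ 0
    · simp only [pvStripAGo, if_pos h]; exact le_trans (ih _ _) (by omega)
    · simp only [pvStripAGo, if_neg h]; exact le_rfl

theorem pvStripA_fst_le (m : Int) (a : Nat) (r : Int) : (pvStripA m a r).1 ≤ a :=
  pvStripAGo_fst_le m a a r

theorem pvStripAGo_fst_pos (m : Int) (fuel : Nat) : ∀ (a : Nat) (r : Int), a ≠ 0 →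
    0 < (pvStripAGo m fuel a r).1 := by
  induction fuel with
  | zero => intro a r h; simpa [pvStripAGo] using Nat.pos_of_ne_zero h
  | succ fuel ih =>
    intro a r h
    by_cases hc : a % 2 = 0 ∧ a ≠ 0
    · simp only [pvStripAGo, if_pos hc]; exact ih _ _ (by omega)
    · simp only [pvStripAGo, if_neg hc]; exact Nat.pos_of_ne_zero h

theorem pvStripA_fst_pos (m : Int) (a : Nat) (r : Int) (h : a ≠ 0) :
    0 < (pvStripA m a r).1 := pvStripAGo_fst_pos m a a r h

theorem pvStripAGo_fst_odd (m : Int) (fuel : Nat) : ∀ (a : Nat) (r : Int), a ≠ 0 → a ≤ fuel →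
    Odd (pvStripAGo m fuel a r).1 := by
  induction fuel with
  | zero => intro a r h hle; omega
  | succ fuel ih =>
    intro a r h hle
    by_cases hc : a % 2 = 0 ∧ a ≠ 0
    · simp only [pvStripAGo, if_pos hc]; exact ih _ _ (by omega) (by omega)
    · simp only [pvStripAGo, if_neg hc]; exact Nat.odd_iff.mpr (by omega)

theorem pvStripA_fst_odd (m : Int) (a : Nat) (r : Int) (h : a ≠ 0) :
    Odd (pvStripA m a r).1 := pvStripAGo_fst_odd m a a r h le_rfl

theorem pv_odd_of_dvd {m n : Nat} (h : m ∣ n) (hn : Odd n) : Odd m := by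
  have h2 := Nat.odd_iff.mp hn
  rcases Nat.even_or_odd m with he | ho
  · exfalso
    have hd : 2 ∣ n := dvd_trans he.two_dvd h
    omega
  · exact ho

-- the sign in quadratic reciprocity, in A's `% 4` form
theorem pv_qr_sign (a b : Nat) (ha : Odd a) (hb : Odd b) :
    ((-1 : Int)) ^ (a / 2 * (b / 2)) =
      if a % 4 = 3 ∧ b % 4 = 3 then -1 else 1 := by
  have ha2 := Nat.odd_iff.mp ha
  have hb2 := Nat.odd_iff.mp hb
  by_cases h : a % 4 = 3 ∧ b % 4 = 3
  · rw [if_pos h]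
    exact Odd.neg_one_pow
      (Nat.odd_mul.mpr ⟨Nat.odd_iff.mpr (by omega), Nat.odd_iff.mpr (by omega)⟩)
  · rw [if_neg h]
    have h1 : Even (a / 2 * (b / 2)) := by
      rcases (by omega : a % 4 = 1 ∨ b % 4 = 1) with h2 | h2
      · exact (Nat.even_iff.mpr (by omega)).mul_right _
      · exact (Nat.even_iff.mpr (by omega)).mul_left _
    exact h1.neg_one_pow

-- the factor-of-2 sign, in A's `% 8` form
theorem pv_two_sign (n : Nat) (hn : Odd n) :
    jacobiSym 2 n = if (n : Int) % 8 = 3 ∨ (n : Int) % 8 = 5 then -1 else 1 := by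
  have h2 := Nat.odd_iff.mp hn
  rw [jacobiSym.at_two hn, ZMod.χ₈_nat_eq_if_mod_eight]
  have h8 : (n : Int) % 8 = ((n % 8 : Nat) : Int) := by omega
  rw [h8]
  rcases (by omega : n % 8 = 1 ∨ n % 8 = 3 ∨ n % 8 = 5 ∨ n % 8 = 7) with h | h | h | h <;>
    simp [h, h2]

-- loop invariant for the 2-stripping loop, Jacobi form
theorem pvStripAGo_spec (n : Nat) (hn : Odd n) (fuel : Nat) : ∀ (a : Nat) (r : Int),
    a ≠ 0 → a ≤ fuel →
    (pvStripAGo (n : Int) fuel a r).2 * jacobiSym ((pvStripAGo (n : Int) fuel a r).1 : Int) n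
      = r * jacobiSym (a : Int) n := by
  induction fuel with
  | zero => intro a r ha hle; omega
  | succ fuel ih =>
    intro a r ha hle
    by_cases h : a % 2 = 0 ∧ a ≠ 0
    · simp only [pvStripAGo, if_pos h]
      rw [ih (a / 2) _ (by omega) (by omega)]
      have hsplit : jacobiSym (a : Int) n = jacobiSym 2 n * jacobiSym ((a / 2 : Nat) : Int) n := by
        rw [← jacobiSym.mul_left]
        congr 1
        omega
      rw [hsplit, pv_two_sign n hn]
      split_ifs with hc <;> ring
    · simp only [pvStripAGo, if_neg h]

theorem pvStripA_spec (n : Nat) (hn : Odd n) (a : Nat) (ha : a ≠ 0) (r : Int) :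
    (pvStripA (n : Int) a r).2 * jacobiSym ((pvStripA (n : Int) a r).1 : Int) n
      = r * jacobiSym (a : Int) n := pvStripAGo_spec n hn a a r ha le_rfl

-- A's reciprocity loop computes the Jacobi symbol
theorem pvJacAGo_spec (fuel : Nat) : ∀ (a n : Nat) (r : Int), a ≤ fuel → Odd n → 0 < n →
    (if (pvJacAGo fuel a n r).1 = 1 then (pvJacAGo fuel a n r).2 else 0)
      = r * jacobiSym (a : Int) n := by
  induction fuel with
  | zero =>
    intro a n r hle hn h0
    have ha : a = 0 := by omega
    subst ha
    by_cases h1 : n = 1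
    · subst h1; simp [pvJacAGo, jacobiSym.one_right]
    · simp only [pvJacAGo, if_neg h1, Nat.cast_zero, jacobiSym.zero_left (by omega : 1 < n)]
      ring
  | succ fuel ih =>
    intro a n r hle hn h0
    by_cases h : a ≠ 0
    · simp only [pvJacAGo, if_pos h]
      have hodd : Odd (pvStripA (n : Int) a r).1 := pvStripA_fst_odd _ _ _ h
      have hpos : 0 < (pvStripA (n : Int) a r).1 := pvStripA_fst_pos _ _ _ h
      have hle' : (pvStripA (n : Int) a r).1 ≤ a := pvStripA_fst_le _ _ _
      have hlt : n % (pvStripA (n : Int) a r).1 < a :=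
        lt_of_lt_of_le (Nat.mod_lt _ hpos) hle'
      rw [ih _ _ _ (by omega) hodd hpos]
      have hmod : jacobiSym ((n % (pvStripA (n : Int) a r).1 : Nat) : Int)
          (pvStripA (n : Int) a r).1 = jacobiSym (n : Int) (pvStripA (n : Int) a r).1 := by
        rw [jacobiSym.mod_left (n : Int) (pvStripA (n : Int) a r).1, Int.natCast_mod]
      have hrec := jacobiSym.quadratic_reciprocity hodd hn
      have hstrip := pvStripA_spec n hn a h r
      rw [hmod, ← hstrip, hrec, pv_qr_sign _ n hodd hn]
      split_ifs with hc <;> ring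
    · rw [not_not] at h
      subst h
      simp only [pvJacAGo, if_neg (by simp : ¬ (0 : Nat) ≠ 0)]
      by_cases h1 : n = 1
      · subst h1; simp [jacobiSym.one_right]
      · rw [if_neg h1, Nat.cast_zero, jacobiSym.zero_left (by omega : 1 < n)]
        ring

theorem pvJacA_spec (a n : Nat) (r : Int) (hn : Odd n) (h0 : 0 < n) :
    (if (pvJacA a n r).1 = 1 then (pvJacA a n r).2 else 0) = r * jacobiSym (a : Int) n :=
  pvJacAGo_spec a a n r le_rfl hn h0

-- two integers in [0, p) with the same residue class are equal
theorem pv_int_eq_of_cast (p : Nat) (hp : 0 < p) (r c : Int)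
    (h : (r : ZMod p) = (c : ZMod p)) (hr0 : 0 ≤ r) (hr1 : r < p)
    (hc0 : 0 ≤ c) (hc1 : c < p) : r = c := by
  have hmod := (ZMod.intCast_eq_intCast_iff' r c p).mp h
  rwa [Int.emod_eq_of_lt hr0 hr1, Int.emod_eq_of_lt hc0 hc1] at hmod

-- Euler's criterion: B's `_legendre` is the Legendre symbol
theorem pvLegendre_eq (p : Nat) (pp : p.Prime) (hp : p ≠ 2) (d : Int) :
    pvLegendre d p = @legendreSym p ⟨pp⟩ d := by
  haveI : Fact p.Prime := ⟨pp⟩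
  have hp2 : 2 < p := lt_of_le_of_ne pp.two_le (Ne.symm hp)
  have hp0 : (0 : Int) < (p : Int) := by exact_mod_cast pp.pos
  unfold pvLegendre
  simp only []
  have hpodd := Nat.odd_iff.mp (pp.odd_of_ne_two hp)
  have hpow : (p - 1) / 2 = p / 2 := by omega
  rw [hpow]
  set r : Int := ((d % (p : Int)) ^ (p / 2)) % (p : Int) with hrdef
  have hr0 : 0 ≤ r := Int.emod_nonneg _ (by omega)
  have hrlt : r < p := Int.emod_lt_of_pos _ hp0
  have hcast : (r : ZMod p) = (d : ZMod p) ^ (p / 2) := by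
    rw [hrdef, ZMod.intCast_mod, Int.cast_pow, ZMod.intCast_mod]
  have hL : (r : ZMod p) = ((@legendreSym p ⟨pp⟩ d : Int) : ZMod p) := by
    rw [hcast, legendreSym.eq_pow p d]
  by_cases h0 : (d : ZMod p) = 0
  · have hLz : @legendreSym p ⟨pp⟩ d = 0 := (legendreSym.eq_zero_iff p d).mpr h0
    rw [hLz] at hL
    have hr : r = 0 :=
      pv_int_eq_of_cast p pp.pos r 0 (by exact_mod_cast hL) hr0 hrlt le_rfl hp0
    rw [hr, hLz, if_neg (by omega)]
  · rcases legendreSym.eq_one_or_neg_one p h0 with h1 | h1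
    · rw [h1] at hL ⊢
      have hr : r = 1 :=
        pv_int_eq_of_cast p pp.pos r 1 (by exact_mod_cast hL) hr0 hrlt (by omega) (by omega)
      rw [hr, if_neg (by omega)]
    · rw [h1] at hL ⊢
      have hc : ((-1 : Int) : ZMod p) = (((p : Int) - 1 : Int) : ZMod p) := by
        push_cast
        rw [ZMod.natCast_self]
        ring
      have hr : r = (p : Int) - 1 :=
        pv_int_eq_of_cast p pp.pos r ((p : Int) - 1) (hL.trans hc) hr0 hrlt
          (by omega) (by omega)
      rw [if_pos hr]

-- B's trial-division loop computes the Jacobi symbol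
theorem pvTrialBGo_spec (d : Int) (fuel : Nat) : ∀ (f n : Nat) (r : Int),
    n + (n - f) < fuel → Odd n → 0 < n → Odd f → 3 ≤ f →
    (∀ p, p.Prime → p ∣ n → f ≤ p) →
    (if 1 < (pvTrialBGo d fuel f n r).1 then
        (pvTrialBGo d fuel f n r).2 * pvLegendre d (pvTrialBGo d fuel f n r).1
      else (pvTrialBGo d fuel f n r).2) = r * jacobiSym d n := by
  induction fuel with
  | zero => intro f n r hM hn h0 hf h3 hfac; omega
  | succ fuel ih =>
    intro f n r hM hn h0 hf h3 hfac
    by_cases hcond : f * f ≤ n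
    · have h2f : 2 * f ≤ f * f := Nat.mul_le_mul_right f (by omega)
      have hfn : f < n := by omega
      by_cases hmod : n % f = 0
      · have hdvd : f ∣ n := Nat.dvd_of_mod_eq_zero hmod
        have hfp : f.Prime := by
          have hq := Nat.minFac_prime (show f ≠ 1 by omega)
          have heq : f.minFac = f :=
            le_antisymm (Nat.minFac_le (by omega)) (hfac _ hq ((Nat.minFac_dvd f).trans hdvd))
          rwa [heq] at hq
        have hq0 : 0 < n / f := Nat.div_pos (Nat.le_of_dvd h0 hdvd) (by omega)
        have hqodd : Odd (n / f) := pv_odd_of_dvd (Nat.div_dvd_of_dvd hdvd) hn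
        have hd1 : n / f * f ≤ n := Nat.div_mul_le_self n f
        have hd2 : n / f * 2 ≤ n / f * f := Nat.mul_le_mul_left (n / f) (by omega)
        simp only [pvTrialBGo, if_pos hcond, if_pos hmod]
        rw [ih f (n / f) (r * pvLegendre d f) (by omega) hqodd hq0 hf h3
            (fun p hp hpd => hfac p hp (hpd.trans (Nat.div_dvd_of_dvd hdvd)))]
        have hne2 : f ≠ 2 := by have := Nat.odd_iff.mp hf; omega
        have hmul : jacobiSym d n = jacobiSym d f * jacobiSym d (n / f) := by
          conv_lhs => rw [← Nat.mul_div_cancel' hdvd]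
          exact jacobiSym.mul_right' d (by omega) (by omega)
        rw [hmul, pvLegendre_eq f hfp hne2 d, @jacobiSym.legendreSym.to_jacobiSym f ⟨hfp⟩ d]
        ring
      · simp only [pvTrialBGo, if_pos hcond, if_neg hmod]
        refine ih (f + 2) n r (by omega) hn h0
          (by have := Nat.odd_iff.mp hf; exact Nat.odd_iff.mpr (by omega))
          (by omega) (fun p hp hpd => ?_)
        have hge := hfac p hp hpd
        have hpodd := Nat.odd_iff.mp (pv_odd_of_dvd hpd hn)
        have hfo := Nat.odd_iff.mp hf
        have hne : p ≠ f := fun he => hmod (Nat.mod_eq_zero_of_dvd (he ▸ hpd))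
        omega
    · simp only [pvTrialBGo, if_neg hcond]
      by_cases h1 : 1 < n
      · have hnp : n.Prime := by
          by_contra hnp
          have hsq := Nat.minFac_sq_le_self h0 hnp
          have hq := Nat.minFac_prime (show n ≠ 1 by omega)
          have hge := hfac _ hq (Nat.minFac_dvd n)
          have hsq' : n.minFac * n.minFac ≤ n := by rwa [pow_two] at hsq
          have : f * f ≤ n.minFac * n.minFac := Nat.mul_le_mul hge hge
          omega
        have hne2 : n ≠ 2 := by have := Nat.odd_iff.mp hn; omega
        rw [if_pos h1, pvLegendre_eq n hnp hne2 d, @jacobiSym.legendreSym.to_jacobiSym n ⟨hnp⟩ d]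
      · have hn1 : n = 1 := by omega
        subst hn1
        rw [if_neg h1, jacobiSym.one_right, mul_one]

theorem pvTrialB_spec (d : Int) (f n : Nat) (r : Int) :
    Odd n → 0 < n → Odd f → 3 ≤ f → (∀ p, p.Prime → p ∣ n → f ≤ p) →
    (if 1 < (pvTrialB d f n r).1 then
        (pvTrialB d f n r).2 * pvLegendre d (pvTrialB d f n r).1
      else (pvTrialB d f n r).2) = r * jacobiSym d n := fun hn h0 hf h3 hfac =>
  pvTrialBGo_spec d (n + n) f n r (by omega) hn h0 hf h3 hfac

-- ===== VERDICT (by name: the statement is the Claim_ definition above) =====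
theorem dirichlet_character_spec : Claim_equal_dirichlet_character := by
  intro d n _
  unfold Spec_dirichlet_character dirichlet_character dirichlet_character_alt
  by_cases h0 : n = 0
  · simp [h0]
  rw [if_neg h0, if_neg h0]
  by_cases h1 : d = 1
  · simp [h1]
  rw [if_neg h1, if_neg h1]
  simp only [pvStripB_eq_pvStripA]
  have hna : n.natAbs ≠ 0 := Int.natAbs_ne_zero.mpr h0
  set r0 : Int := if n < 0 ∧ d < 0 then -1 else 1 with hr0
  have hodd := pvStripA_fst_odd d n.natAbs r0 hna
  have hpos := pvStripA_fst_pos d n.natAbs r0 hna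
  have hB := pvTrialB_spec d 3 (pvStripA d n.natAbs r0).1 (pvStripA d n.natAbs r0).2
    hodd hpos (by decide) (by omega)
    (fun p hp hpd => by
      have := Nat.odd_iff.mp (pv_odd_of_dvd hpd hodd)
      have := hp.two_le
      omega)
  rw [hB]
  by_cases ht1 : (pvStripA d n.natAbs r0).1 = 1
  · rw [if_pos ht1, ht1, jacobiSym.one_right, mul_one]
  · rw [if_neg ht1]
    have hpos' : (0 : Int) < ((pvStripA d n.natAbs r0).1 : Int) := by exact_mod_cast hpos
    have hnn : ¬ (d % ((pvStripA d n.natAbs r0).1 : Int) < 0) :=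
      not_lt.mpr (Int.emod_nonneg d (by omega))
    rw [if_neg hnn]
    have hA := pvJacA_spec (d % ((pvStripA d n.natAbs r0).1 : Int)).toNat
      (pvStripA d n.natAbs r0).1 (pvStripA d n.natAbs r0).2 hodd hpos
    rw [hA]
    have hcast : (((d % ((pvStripA d n.natAbs r0).1 : Int)).toNat : Nat) : Int)
        = d % ((pvStripA d n.natAbs r0).1 : Int) :=
      Int.toNat_of_nonneg (Int.emod_nonneg d (by omega))
    rw [hcast, ← jacobiSym.mod_left]
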